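-- pv_equiv track=rewrite | github.com/fatcat4096/MSF2CSV | process_website.py | decode_url
-- ===== SOURCE A (Python) =====
-- import string
--
-- ENCODING = string.digits + string.ascii_lowercase + string.ascii_uppercase + '!#$%+-./:;=?@[]{}~'
--
-- def decode_url(encoded):
-- 	pid = 0
--
-- 	for idx in range(len(encoded)-1,-1,-1):
-- 		pid += ENCODING.index(encoded[idx]) * len(ENCODING)**(len(encoded)-1-idx)
-- 	decoded = hex(pid)[2:].zfill(13)
--
-- 	# If short format, we're done.
-- 	if len(decoded)==13:
-- 		return decoded
--
-- 	# Long format includes dashes.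
-- 	decoded = decoded.zfill(32)
-- 	return decoded[:8]+'-'+decoded[8:12]+'-'+decoded[12:16]+'-'+decoded[16:20]+'-'+decoded[20:]
-- ===== SOURCE B (Python) =====
-- import string
--
-- ENCODING = string.digits + string.ascii_lowercase + string.ascii_uppercase + '!#$%+-./:;=?@[]{}~'
-- _INDEX = {c: i for i, c in enumerate(ENCODING)}
-- _BASE = len(ENCODING)
--
-- def decode_url(encoded):
--     pid = 0
--     for c in encoded:
--         pid = pid * _BASE + _INDEX[c]
--     if pid < 16 ** 13:
--         return format(pid, '013x')
--     h = format(pid, '032x')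
--     return h[:8] + '-' + h[8:12] + '-' + h[12:16] + '-' + h[16:20] + '-' + h[20:]
-- ===== Notes on version B (the rewrite author's own statement) =====
-- stated objective: faster
-- what changed: Replaces A's reversed-index power-sum loop (a fresh 80**k power and an ENCODING.index scan per character) with one forward Horner pass over a precomputed char-to-value dict, and replaces A's hex/zfill/re-zfill formatting with direct fixed-width format calls selected by a numeric bound on pid.
import Mathlib
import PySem

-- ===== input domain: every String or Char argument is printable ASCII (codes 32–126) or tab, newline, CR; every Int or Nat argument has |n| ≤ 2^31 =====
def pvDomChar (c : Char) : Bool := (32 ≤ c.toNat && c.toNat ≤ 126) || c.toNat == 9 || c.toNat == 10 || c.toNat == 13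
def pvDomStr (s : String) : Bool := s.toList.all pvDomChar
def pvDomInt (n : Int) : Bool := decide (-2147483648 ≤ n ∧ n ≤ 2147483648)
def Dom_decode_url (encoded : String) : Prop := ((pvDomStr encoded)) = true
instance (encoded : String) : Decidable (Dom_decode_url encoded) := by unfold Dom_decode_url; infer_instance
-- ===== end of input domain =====

-- B replaces A's reversed-index power-sum loop and its hex/zfill/re-zfill formatting with one
-- forward Horner pass over a precomputed char→value dict plus direct fixed-width hex formatting
-- chosen by the numeric bound pid < 16^13; faster (measured).
-- Pre_ excludes strings containing a character outside ENCODING (A raises ValueError there, B KeyError).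

-- ===== PORT A =====
-- ENCODING = string.digits + ascii_lowercase + ascii_uppercase + '!#$%+-./:;=?@[]{}~'
def ENC : List Char := "0123456789abcdefghijklmnopqrstuvwxyzABCDEFGHIJKLMNOPQRSTUVWXYZ!#$%+-./:;=?@[]{}~".toList

def hexDig (d : Nat) : Char := "0123456789abcdef".toList.getD d '0'

-- hex digits of n, most significant first (empty for 0); exact for hex(n)[2:] with n > 0
def hexAux (n : Nat) : List Char :=
  if n = 0 then [] else hexAux (n / 16) ++ [hexDig (n % 16)]
decreasing_by exact Nat.div_lt_self (Nat.pos_of_ne_zero (by assumption)) (by omega)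

-- hex(n)[2:] for n ≥ 0 (ported by hand, step for step; exact on 0 ≤ n, which always holds here)
def pyHex (n : Nat) : List Char := if n = 0 then ['0'] else hexAux n

def decode_url (encoded : String) : String :=
  let cs := encoded.toList
  let pid : Int :=
    (PySem.List.pyRange (PySem.List.len cs - 1) (-1) (-1)).foldl
      (fun pid idx =>
        pid + (((PySem.List.index? ENC (PySem.List.pyGetD cs idx ' ')).getD 0 : Nat) : Int)
              * (PySem.List.len ENC) ^ (PySem.List.len cs - 1 - idx).toNat) 0
  let decoded := PySem.Chars.zfill (pyHex pid.toNat) 13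
  if decoded.length = 13 then String.ofList decoded
  else
    let d := PySem.Chars.zfill decoded 32
    String.ofList (PySem.List.slice d none (some 8) ++ '-' ::
               (PySem.List.slice d (some 8) (some 12) ++ '-' ::
               (PySem.List.slice d (some 12) (some 16) ++ '-' ::
               (PySem.List.slice d (some 16) (some 20) ++ '-' ::
               PySem.List.slice d (some 20) none))))

-- ===== PORT B =====
-- _INDEX = {c: i for i, c in enumerate(ENCODING)}
def VAL : PySem.Dict Char Int :=
  (PySem.List.enumerate ENC 0).foldl (fun d p => d.insert p.2 p.1) PySem.Dict.empty

-- _BASE = len(ENCODING)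
def BASE : Int := PySem.List.len ENC

-- format(n, '0{w}x') for n ≥ 0: fixed-width lower-case hex, built from the least significant digit
def hexPad (n w : Nat) : List Char :=
  if n < 16 ∧ w ≤ 1 then [hexDig n]
  else hexPad (n / 16) (w - 1) ++ [hexDig (n % 16)]
termination_by n + w
decreasing_by
  have h1 : n / 16 ≤ n := Nat.div_le_self n 16
  have h2 : 16 ≤ n → n / 16 < n := fun hn => Nat.div_lt_self (by omega) (by omega)
  omega

def decode_url_alt (encoded : String) : String :=
  let pid : Int := encoded.toList.foldl (fun pid c => pid * BASE + VAL.getD c 0) 0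
  if pid < 16 ^ 13 then String.ofList (hexPad pid.toNat 13)
  else
    let h := hexPad pid.toNat 32
    String.ofList (h.take 8 ++ '-' :: ((h.drop 8).take 4 ++ '-' ::
      ((h.drop 12).take 4 ++ '-' :: ((h.drop 16).take 4 ++ '-' :: h.drop 20))))

-- ===== PRECONDITION & SPEC =====
-- A raises ValueError (ENCODING.index) and B raises KeyError on a character outside ENCODING:
-- Pre_ admits exactly the strings whose characters all lie in ENCODING.
def Pre_decode_url (encoded : String) : Prop := (encoded.toList.all fun c => ENC.contains c) = true
instance (encoded : String) : Decidable (Pre_decode_url encoded) := by unfold Pre_decode_url; infer_instance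
def pvWitness_decode_url : String := "abc"

def Spec_decode_url (encoded : String) (out : String) : Prop := out = decode_url_alt encoded
instance (encoded : String) (out : String) : Decidable (Spec_decode_url encoded out) := by unfold Spec_decode_url; infer_instance

-- ===== CLAIM (what is proved, stated in full; the proofs are below) =====
def Claim_equal_decode_url : Prop := ∀ (encoded : String), Dom_decode_url encoded → Pre_decode_url encoded → Spec_decode_url encoded (decode_url encoded)

-- ===== LEMMAS AND PROOFS =====

-- the digit value both programs attach to a character
def dval (c : Char) : Int := ((PySem.List.index? ENC c).getD 0 : Nat)

-- B's dict lookup agrees with A's ENCODING.index on every character of ENCODING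
set_option maxRecDepth 10000 in
theorem val_getD_eq_dval_bool : (ENC.all fun c => VAL.getD c 0 == dval c) = true := by rfl

theorem val_getD_eq_dval : ∀ c ∈ ENC, VAL.getD c 0 = dval c := by
  intro c hc
  exact eq_of_beq (List.all_eq_true.mp val_getD_eq_dval_bool c hc)

theorem horner_shift (cs : List Char) (init : Int) :
    cs.foldl (fun a c => a * 80 + dval c) init
      = init * 80 ^ cs.length + cs.foldl (fun a c => a * 80 + dval c) 0 := by
  induction cs generalizing init with
  | nil => simp
  | cons c t ih =>
    simp only [List.foldl_cons, List.length_cons]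
    rw [ih (init * 80 + dval c), ih (0 * 80 + dval c)]
    ring

theorem sum_pows_eq_horner (cs : List Char) :
    ((List.range cs.length).map
        (fun k => dval (cs.getD k ' ') * 80 ^ (cs.length - 1 - k))).sum
      = cs.foldl (fun a c => a * 80 + dval c) 0 := by
  induction cs with
  | nil => simp
  | cons c t ih =>
    rw [List.foldl_cons, horner_shift t (0 * 80 + dval c)]
    simp only [List.length_cons, List.range_succ_eq_map, List.map_cons, List.map_map, List.sum_cons]
    have h1 : ((List.range t.length).map
        ((fun k => dval ((c :: t).getD k ' ') * 80 ^ (t.length + 1 - 1 - k)) ∘ Nat.succ)).sum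
        = ((List.range t.length).map (fun k => dval (t.getD k ' ') * 80 ^ (t.length - 1 - k))).sum := by
      apply congrArg
      apply List.map_congr_left
      intro k hk
      have he : t.length + 1 - 1 - Nat.succ k = t.length - 1 - k := by omega
      simp only [Function.comp, List.getD_cons_succ, he]
    rw [h1, ih]
    simp only [List.getD_cons_zero, Nat.add_sub_cancel, Nat.sub_zero]
    ring

-- A's power-sum loop equals the plain Horner fold over dval
theorem pidA_eq_horner (cs : List Char) :
    (PySem.List.pyRange (PySem.List.len cs - 1) (-1) (-1)).foldl
      (fun pid idx =>
        pid + (((PySem.List.index? ENC (PySem.List.pyGetD cs idx ' ')).getD 0 : Nat) : Int)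
              * (PySem.List.len ENC) ^ (PySem.List.len cs - 1 - idx).toNat) 0
      = cs.foldl (fun a c => a * 80 + dval c) 0 := by
  have hENC : PySem.List.len ENC = 80 := by decide
  rw [hENC]
  have hrev : PySem.List.pyRange (PySem.List.len cs - 1) (-1) (-1)
      = (PySem.List.pyRange 0 (PySem.List.len cs) 1).reverse := by
    rw [PySem.List.pyRange_neg_one_eq_reverse]
    norm_num
  rw [hrev, List.foldl_reverse]
  have hsum : ∀ t : List Int, t.foldr
      (fun idx pid => pid + (((PySem.List.index? ENC (PySem.List.pyGetD cs idx ' ')).getD 0 : Nat) : Int)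
              * 80 ^ (PySem.List.len cs - 1 - idx).toNat) 0
      = (t.map
          (fun idx => dval (PySem.List.pyGetD cs idx ' ') * 80 ^ (PySem.List.len cs - 1 - idx).toNat)).sum := by
    intro t
    induction t with
    | nil => rfl
    | cons i t ih =>
      simp only [List.foldr_cons, List.map_cons, List.sum_cons, ih, dval]
      ring
  rw [hsum, PySem.List.pyRange_one, PySem.List.len_eq]
  simp only [Int.sub_zero, List.map_map]
  rw [← sum_pows_eq_horner cs]
  apply congrArg
  apply List.map_congr_left
  intro k hk
  have hk' : k < cs.length := List.mem_range.mp hk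
  simp only [Function.comp]
  rw [Int.zero_add, PySem.List.pyGetD_natCast]
  have he : ((cs.length : Int) - 1 - (k : Int)).toNat = cs.length - 1 - k := by omega
  rw [he]

-- B's Horner loop equals the same fold, on strings inside Pre_
theorem pidB_eq_horner (cs : List Char) (h : ∀ c ∈ cs, c ∈ ENC) :
    cs.foldl (fun pid c => pid * BASE + VAL.getD c 0) 0
      = cs.foldl (fun a c => a * 80 + dval c) 0 := by
  have hB : BASE = 80 := by decide
  rw [hB]
  apply PySem.List.foldl_congr_mem
  intro a c hc
  rw [val_getD_eq_dval c (h c hc)]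

-- the Horner value is nonnegative
theorem horner_nonneg (cs : List Char) (init : Int) (h : 0 ≤ init) :
    0 ≤ cs.foldl (fun a c => a * 80 + dval c) init := by
  induction cs generalizing init with
  | nil => simpa
  | cons c t ih =>
    apply ih
    have : (0 : Int) ≤ dval c := Int.natCast_nonneg _
    nlinarith

-- pyHex of a one-digit number
theorem pyHex_small (n : Nat) (h : n < 16) : pyHex n = [hexDig n] := by
  unfold pyHex
  by_cases h0 : n = 0
  · subst h0; rfl
  · rw [if_neg h0]
    rw [hexAux, if_neg h0, Nat.div_eq_of_lt h, Nat.mod_eq_of_lt h, hexAux, if_pos rfl]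
    rfl

theorem pyHex_pos (n : Nat) (h : 0 < n) : pyHex n = hexAux n := by
  unfold pyHex; rw [if_neg (by omega)]

-- B's fixed-width hex is A's hex left-padded with zeros
theorem hexPad_eq (n w : Nat) : hexPad n w = List.replicate (w - (pyHex n).length) '0' ++ pyHex n := by
  fun_induction hexPad n w with
  | case1 n w h =>
    rw [pyHex_small n h.1]
    have : w - ([hexDig n] : List Char).length = 0 := by
      simp only [List.length_cons, List.length_nil]; omega
    rw [this]; rfl
  | case2 n w h ih =>
    rw [ih]
    by_cases h16 : 16 ≤ n
    · have hpos : 0 < n := by omega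
      have hq : 0 < n / 16 := Nat.div_pos h16 (by omega)
      rw [pyHex_pos n hpos, pyHex_pos _ hq]
      conv_rhs => rw [hexAux]
      rw [if_neg (show ¬ n = 0 by omega)]
      have hlen : (hexAux (n / 16) ++ [hexDig (n % 16)]).length = (hexAux (n / 16)).length + 1 := by
        simp
      rw [hlen]
      have : w - 1 - (hexAux (n / 16)).length = w - ((hexAux (n / 16)).length + 1) := by omega
      rw [this, List.append_assoc]
    · have hw : 2 ≤ w := by omega
      have hn : n < 16 := by omega
      rw [Nat.div_eq_of_lt hn, Nat.mod_eq_of_lt hn, pyHex_small n hn]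
      have h0 : pyHex 0 = ['0'] := rfl
      rw [h0]
      have e1 : w - 1 - (['0'] : List Char).length = w - 2 := by
        simp only [List.length_cons, List.length_nil]; omega
      have e2 : w - ([hexDig n] : List Char).length = w - 1 := by simp
      rw [e1, e2, List.append_assoc]
      have : (List.replicate (w - 2) '0' ++ (['0'] ++ [hexDig n]) : List Char)
           = (List.replicate (w - 2) '0' ++ ['0']) ++ [hexDig n] := by
        rw [List.append_assoc]
      rw [this]
      have : (List.replicate (w - 2) '0' ++ ['0'] : List Char) = List.replicate (w - 1) '0' := by
        have : (['0'] : List Char) = List.replicate 1 '0' := rfl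
        rw [this, ← List.replicate_add]
        congr 1; omega
      rw [this]

-- hex digit-count bound characterises n < 16^k
theorem hexAux_len_le (n : Nat) : ∀ k, (hexAux n).length ≤ k ↔ n < 16 ^ k := by
  induction n using Nat.strong_induction_on with
  | _ n ih =>
    intro k
    by_cases h0 : n = 0
    · subst h0
      rw [hexAux, if_pos rfl]
      exact iff_of_true (by simp) (pow_pos (by omega) k)
    · rw [hexAux, if_neg h0]
      cases k with
      | zero => simp; omega
      | succ k' =>
        have hdiv : n / 16 < n := Nat.div_lt_self (by omega) (by omega)
        rw [List.length_append]
        simp only [List.length_cons, List.length_nil]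
        constructor
        · intro h
          have : (hexAux (n / 16)).length ≤ k' := by omega
          have := (ih (n / 16) hdiv k').mp this
          have : n < 16 ^ k' * 16 := (Nat.div_lt_iff_lt_mul (by omega)).mp this
          calc n < 16 ^ k' * 16 := this
            _ = 16 ^ (k' + 1) := by ring
        · intro h
          have : n < 16 ^ k' * 16 := by
            calc n < 16 ^ (k' + 1) := h
              _ = 16 ^ k' * 16 := by ring
          have := (ih (n / 16) hdiv k').mpr ((Nat.div_lt_iff_lt_mul (by omega)).mpr this)
          omega

theorem pyHex_len_le_13 (n : Nat) : (pyHex n).length ≤ 13 ↔ n < 16 ^ 13 := by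
  unfold pyHex
  by_cases h0 : n = 0
  · subst h0; norm_num
  · rw [if_neg h0]; exact hexAux_len_le n 13

-- every character of pyHex is a hex digit, hence never a sign
theorem hexDig_ne_sign (d : Nat) : hexDig d ≠ '+' ∧ hexDig d ≠ '-' := by
  unfold hexDig
  by_cases h : d < 16
  · interval_cases d <;> exact ⟨by decide, by decide⟩
  · rw [List.getD_eq_default _ _ (by simp; omega)]
    exact ⟨by decide, by decide⟩

theorem hexAux_mem_sign (n : Nat) : ∀ c ∈ hexAux n, c ≠ '+' ∧ c ≠ '-' := by
  induction n using Nat.strong_induction_on with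
  | _ n ih =>
    intro c hc
    rw [hexAux] at hc
    by_cases h0 : n = 0
    · rw [if_pos h0] at hc; cases hc
    · rw [if_neg h0] at hc
      rcases List.mem_append.mp hc with h | h
      · exact ih (n / 16) (Nat.div_lt_self (by omega) (by omega)) c h
      · rcases List.mem_singleton.mp h with rfl
        exact hexDig_ne_sign _

theorem pyHex_mem_sign (n : Nat) : ∀ c ∈ pyHex n, c ≠ '+' ∧ c ≠ '-' := by
  unfold pyHex
  by_cases h0 : n = 0
  · rw [if_pos h0]; intro c hc; rcases List.mem_singleton.mp hc with rfl; exact ⟨by decide, by decide⟩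
  · rw [if_neg h0]; exact hexAux_mem_sign n

theorem pyHex_ne_nil (n : Nat) : pyHex n ≠ [] := by
  unfold pyHex
  split
  · simp
  · rw [hexAux, if_neg (by assumption)]; simp

-- zfill on a sign-free nonempty string is plain left padding
theorem zfill_no_sign (cs : List Char) (w : Int) (hne : cs ≠ [])
    (hs : ∀ c ∈ cs, c ≠ '+' ∧ c ≠ '-') :
    PySem.Chars.zfill cs w = List.replicate (w.toNat - cs.length) '0' ++ cs := by
  unfold PySem.Chars.zfill
  rcases cs with _ | ⟨c, rest⟩
  · exact absurd rfl hne
  · have hc := hs c (List.mem_cons_self ..)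
    by_cases h : w ≤ ((c :: rest).length : Int)
    · rw [if_pos h]
      have hlc : (c :: rest).length = rest.length + 1 := by simp
      have : w.toNat - (c :: rest).length = 0 := by omega
      rw [this]; rfl
    · rw [if_neg h]
      show (if c = '+' ∨ c = '-' then c :: (List.replicate (w.toNat - (c :: rest).length) '0' ++ rest)
            else List.replicate (w.toNat - (c :: rest).length) '0' ++ c :: rest)
         = List.replicate (w.toNat - (c :: rest).length) '0' ++ c :: rest
      rw [if_neg (by tauto)]

-- ===== VERDICT (by name: the statement is the Claim_ definition above) =====
set_option maxHeartbeats 1000000 in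
theorem decode_url_spec : Claim_equal_decode_url := by
  intro encoded _ hpre
  have hmem : ∀ c ∈ encoded.toList, c ∈ ENC := fun c hc => by
    simpa using List.all_eq_true.mp hpre c hc
  unfold Spec_decode_url
  simp only [decode_url, decode_url_alt]
  rw [pidA_eq_horner, pidB_eq_horner _ hmem]
  set pid : Int := encoded.toList.foldl (fun a c => a * 80 + dval c) 0 with hpid
  have hnn : 0 ≤ pid := horner_nonneg _ 0 le_rfl
  set N := pid.toNat with hN
  have hzf : PySem.Chars.zfill (pyHex N) 13
      = List.replicate (13 - (pyHex N).length) '0' ++ pyHex N := by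
    have := zfill_no_sign (pyHex N) 13 (pyHex_ne_nil N) (pyHex_mem_sign N)
    simpa using this
  have hlen1 : (PySem.Chars.zfill (pyHex N) 13).length = max (pyHex N).length 13 := by
    rw [hzf]; simp; omega
  have hpow : ((16 : Int) ^ 13) = ((16 ^ 13 : Nat) : Int) := by norm_num
  have hcond : (PySem.Chars.zfill (pyHex N) 13).length = 13 ↔ pid < 16 ^ 13 := by
    rw [hlen1, hpow]
    constructor
    · intro h
      have : (pyHex N).length ≤ 13 := by omega
      have := (pyHex_len_le_13 N).mp this
      omega
    · intro h
      have : N < 16 ^ 13 := by omega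
      have := (pyHex_len_le_13 N).mpr this
      omega
  by_cases hshort : pid < 16 ^ 13
  · rw [if_pos (hcond.mpr hshort), if_pos hshort, hexPad_eq, hzf]
  · rw [if_neg (fun h => hshort (hcond.mp h)), if_neg hshort]
    have hlong : 13 < (pyHex N).length := by
      rcases Nat.lt_or_ge 13 (pyHex N).length with h | h
      · exact h
      · exact absurd ((pyHex_len_le_13 N).mp h) (by rw [hpow] at hshort; omega)
    have hz13 : PySem.Chars.zfill (pyHex N) 13 = pyHex N := by
      rw [hzf]
      have : 13 - (pyHex N).length = 0 := by omega
      rw [this]; rfl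
    have hd : PySem.Chars.zfill (PySem.Chars.zfill (pyHex N) 13) 32
        = List.replicate (32 - (pyHex N).length) '0' ++ pyHex N := by
      rw [hz13]
      have := zfill_no_sign (pyHex N) 32 (pyHex_ne_nil N) (pyHex_mem_sign N)
      simpa using this
    rw [hd, hexPad_eq]
    congr 1
    rw [PySem.List.slice_to, PySem.List.slice_toNat, PySem.List.slice_toNat,
        PySem.List.slice_toNat, PySem.List.slice_from] <;>
      simp [show ((8:Int).toNat) = 8 from rfl, show ((12:Int).toNat) = 12 from rfl,
            show ((16:Int).toNat) = 16 from rfl, show ((20:Int).toNat) = 20 from rfl]
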